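-- pv_equiv track=rewrite | github.com/kumod1991/vcp-engine | vcp_engine.py | valid_vcp
-- ===== SOURCE A (Python) =====
-- def valid_vcp(drops):
--     if len(drops) < 3:
--         return False
--
--     improving = all(drops[i] > drops[i+1] for i in range(len(drops)-1))
--
--     if not improving:
--         violations = sum(drops[i] <= drops[i+1] for i in range(len(drops)-1))
--         if violations > 1:
--             return False
--
--     if drops[0] < 8:
--         return False
--
--     if drops[-1] > 12:
--         return False
--
--     return True
-- ===== SOURCE B (Python) =====
-- def _strict(xs, i):
--     # xs is strictly decreasing from index i onward
--     while i + 1 < len(xs):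
--         if xs[i] <= xs[i + 1]:
--             return False
--         i += 1
--     return True
--
-- def _almost(xs):
--     # strictly decreasing except for at most one adjacent non-decrease:
--     # walk while strictly decreasing; at the first non-decrease spend the
--     # single grace and hand off to _strict for the remainder
--     i = 0
--     while i + 1 < len(xs):
--         if xs[i] <= xs[i + 1]:
--             return _strict(xs, i + 1)
--         i += 1
--     return True
--
-- def valid_vcp(drops):
--     return (len(drops) >= 3 and drops[0] >= 8 and drops[-1] <= 12
--             and _almost(drops))
-- ===== Notes on version B (the rewrite author's own statement) =====
-- stated objective: simpler
-- what changed: Replaces A's two indexed counting scans (an `all` pass computing `improving`, then a `sum` pass counting violations compared against 1) with a no-counter grace-handoff decomposition: `_almost` walks while the list is strictly decreasing and, at the first adjacent non-decrease, spends its single grace and hands off to `_strict`, which requires the remainder to be strictly decreasing; boundary checks become one boolean conjunction evaluated first, so the scan is skipped entirely when a boundary check fails.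
import Mathlib
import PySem

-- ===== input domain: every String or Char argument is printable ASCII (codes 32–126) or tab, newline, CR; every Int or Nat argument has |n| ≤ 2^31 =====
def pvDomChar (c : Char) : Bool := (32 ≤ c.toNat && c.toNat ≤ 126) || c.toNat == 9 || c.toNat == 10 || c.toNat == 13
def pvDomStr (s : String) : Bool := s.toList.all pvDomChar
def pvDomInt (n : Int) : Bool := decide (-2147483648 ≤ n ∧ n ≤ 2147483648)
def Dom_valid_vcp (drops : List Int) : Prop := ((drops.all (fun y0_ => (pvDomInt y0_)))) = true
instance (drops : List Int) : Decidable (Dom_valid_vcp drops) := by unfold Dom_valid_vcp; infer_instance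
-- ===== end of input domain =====

-- B replaces A's indexed counting scans with a no-counter grace-handoff decomposition
-- (walk while strictly decreasing, hand off to a plain strict check at the first
-- non-decrease; boundary checks first). Objective: simpler; a timing run measured it
-- faster (constant factor). Return values are proved equal on all inputs.

-- ===== PORT A =====
def valid_vcp (drops : List Int) : Bool :=
  if drops.length < 3 then false
  else
    let improving := (PySem.List.pyRange 0 ((drops.length : Int) - 1) 1).all
      (fun i => decide (PySem.List.pyGetD drops i 0 > PySem.List.pyGetD drops (i + 1) 0))
    let fail1 : Bool :=
      if !improving then
        let violations := ((PySem.List.pyRange 0 ((drops.length : Int) - 1) 1).map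
          (fun i => if PySem.List.pyGetD drops i 0 ≤ PySem.List.pyGetD drops (i + 1) 0 then (1 : Int) else 0)).sum
        decide (violations > 1)
      else false
    if fail1 then false
    else if PySem.List.pyGetD drops 0 0 < 8 then false
    else if PySem.List.pyGetD drops (-1) 0 > 12 then false
    else true

-- ===== PORT B =====
-- Python _strict: strictly decreasing from the current suffix on (the while loop over i
-- becomes structural recursion on the suffix)
def vcpStrict : List Int → Bool
  | a :: b :: rest => decide (a > b) && vcpStrict (b :: rest)
  | _ => true

-- Python _almost: walk while strictly decreasing; at the first non-decrease spend the
-- single grace and hand off to vcpStrict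
def vcpAlmost : List Int → Bool
  | a :: b :: rest => if a > b then vcpAlmost (b :: rest) else vcpStrict (b :: rest)
  | _ => true

def valid_vcp_alt (drops : List Int) : Bool :=
  decide (drops.length ≥ 3) && decide (PySem.List.pyGetD drops 0 0 ≥ 8)
    && decide (PySem.List.pyGetD drops (-1) 0 ≤ 12) && vcpAlmost drops

-- ===== PRECONDITION & SPEC =====
def Spec_valid_vcp (drops : List Int) (out : Bool) : Prop := out = valid_vcp_alt drops
instance (drops : List Int) (out : Bool) : Decidable (Spec_valid_vcp drops out) := by unfold Spec_valid_vcp; infer_instance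

-- ===== CLAIM (what is proved, stated in full; the proofs are below) =====
def Claim_equal_valid_vcp : Prop := ∀ (drops : List Int), Dom_valid_vcp drops → Spec_valid_vcp drops (valid_vcp drops)

-- ===== LEMMAS AND PROOFS =====

-- number of adjacent-pair violations (a ≤ b), the quantity both programs constrain
def pvViol : List Int → Nat
  | a :: b :: rest => (if a ≤ b then 1 else 0) + pvViol (b :: rest)
  | _ => 0

theorem vcpStrict_eq : ∀ (xs : List Int), vcpStrict xs = decide (pvViol xs = 0) := by
  intro xs
  induction xs with
  | nil => simp [vcpStrict, pvViol]
  | cons a tl ih =>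
    cases tl with
    | nil => simp [vcpStrict, pvViol]
    | cons b rest =>
      by_cases hab : a ≤ b
      · have h2 : ¬ (a > b) := by omega
        simp [vcpStrict, pvViol, hab, h2]
      · have h2 : a > b := by omega
        simp [vcpStrict, pvViol, hab, h2, ih]

theorem vcpAlmost_eq : ∀ (xs : List Int), vcpAlmost xs = decide (pvViol xs ≤ 1) := by
  intro xs
  induction xs with
  | nil => simp [vcpAlmost, pvViol]
  | cons a tl ih =>
    cases tl with
    | nil => simp [vcpAlmost, pvViol]
    | cons b rest =>
      by_cases hab : a ≤ b
      · have : ¬ (a > b) := by omega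
        simp [vcpAlmost, pvViol, hab, this, vcpStrict_eq]
      · have : a > b := by omega
        simp [vcpAlmost, pvViol, hab, this, ih]

theorem range_sum_eq_viol : ∀ (xs : List Int),
    ((List.range (xs.length - 1)).map
      (fun k => if xs.getD k 0 ≤ xs.getD (k + 1) 0 then (1 : Int) else 0)).sum = (pvViol xs : Int) := by
  intro xs
  induction xs with
  | nil => simp [pvViol]
  | cons a tl ih =>
    cases tl with
    | nil => simp [pvViol]
    | cons b rest =>
      have hlen : (a :: b :: rest).length - 1 = (b :: rest).length - 1 + 1 := by
        simp
      rw [hlen, List.range_succ_eq_map]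
      simp only [List.map_cons, List.map_map, List.sum_cons]
      have : ((List.range ((b :: rest).length - 1)).map
          ((fun k => if (a :: b :: rest).getD k 0 ≤ (a :: b :: rest).getD (k + 1) 0 then (1 : Int) else 0) ∘ Nat.succ)).sum
          = ((List.range ((b :: rest).length - 1)).map
          (fun k => if (b :: rest).getD k 0 ≤ (b :: rest).getD (k + 1) 0 then (1 : Int) else 0)).sum := by
        apply congrArg
        apply List.map_congr_left
        intro k _
        simp [Function.comp, List.getD]
      rw [this, ih]
      by_cases hab : a ≤ b <;> simp [pvViol, hab]

theorem range_all_eq_viol : ∀ (xs : List Int),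
    ((List.range (xs.length - 1)).all
      (fun k => decide (xs.getD k 0 > xs.getD (k + 1) 0))) = decide (pvViol xs = 0) := by
  intro xs
  induction xs with
  | nil => simp [pvViol]
  | cons a tl ih =>
    cases tl with
    | nil => simp [pvViol]
    | cons b rest =>
      have hlen : (a :: b :: rest).length - 1 = (b :: rest).length - 1 + 1 := by
        simp
      rw [hlen, List.range_succ_eq_map]
      simp only [List.all_cons, List.all_map]
      have : ((List.range ((b :: rest).length - 1)).all
          ((fun k => decide ((a :: b :: rest).getD k 0 > (a :: b :: rest).getD (k + 1) 0)) ∘ Nat.succ))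
          = ((List.range ((b :: rest).length - 1)).all
          (fun k => decide ((b :: rest).getD k 0 > (b :: rest).getD (k + 1) 0))) := by
        apply congrArg
        funext k
        simp [Function.comp, List.getD]
      rw [this, ih]
      by_cases hab : b < a <;> simp [pvViol, hab]

-- transport the pyRange/pyGetD scans of port A to Nat-indexed range scans
theorem pyRange_map_eq (xs : List Int) (f : Int → Int → Int) :
    ((PySem.List.pyRange 0 ((xs.length : Int) - 1) 1).map
      (fun i => f (PySem.List.pyGetD xs i 0) (PySem.List.pyGetD xs (i + 1) 0)))
    = (List.range (xs.length - 1)).map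
      (fun k => f (xs.getD k 0) (xs.getD (k + 1) 0)) := by
  rw [PySem.List.pyRange_one, List.map_map]
  have hcast : ((xs.length : Int) - 1 - 0).toNat = xs.length - 1 := by omega
  rw [hcast]
  have hf : ((fun i => f (PySem.List.pyGetD xs i 0) (PySem.List.pyGetD xs (i + 1) 0)) ∘ fun k : Nat => (0 : Int) + k)
      = fun k : Nat => f (xs.getD k 0) (xs.getD (k + 1) 0) := by
    funext k
    simp only [Function.comp_apply, zero_add]
    rw [show ((k : Int) + 1) = ((k + 1 : Nat) : Int) by push_cast; ring,
        PySem.List.pyGetD_natCast, PySem.List.pyGetD_natCast]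
  rw [hf]

theorem pyRange_all_eq (xs : List Int) (p : Int → Int → Bool) :
    ((PySem.List.pyRange 0 ((xs.length : Int) - 1) 1).all
      (fun i => p (PySem.List.pyGetD xs i 0) (PySem.List.pyGetD xs (i + 1) 0)))
    = (List.range (xs.length - 1)).all
      (fun k => p (xs.getD k 0) (xs.getD (k + 1) 0)) := by
  rw [PySem.List.pyRange_one, List.all_map]
  have hcast : ((xs.length : Int) - 1 - 0).toNat = xs.length - 1 := by omega
  rw [hcast]
  have hf : ((fun i => p (PySem.List.pyGetD xs i 0) (PySem.List.pyGetD xs (i + 1) 0)) ∘ fun k : Nat => (0 : Int) + k)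
      = fun k : Nat => p (xs.getD k 0) (xs.getD (k + 1) 0) := by
    funext k
    simp only [Function.comp_apply, zero_add]
    rw [show ((k : Int) + 1) = ((k + 1 : Nat) : Int) by push_cast; ring,
        PySem.List.pyGetD_natCast, PySem.List.pyGetD_natCast]
  rw [hf]

theorem valid_vcp_eq_alt (drops : List Int) : valid_vcp drops = valid_vcp_alt drops := by
  unfold valid_vcp valid_vcp_alt
  by_cases hlen : drops.length < 3
  · simp [hlen]
  · simp only [hlen, if_false]
    have hall := pyRange_all_eq drops (fun a b => decide (a > b))
    have hsum := pyRange_map_eq drops (fun a b => if a ≤ b then (1 : Int) else 0)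
    rw [hall, range_all_eq_viol, hsum, range_sum_eq_viol, vcpAlmost_eq]
    have hge : drops.length ≥ 3 := by omega
    by_cases hv : pvViol drops = 0
    · simp [hv, hge]
      by_cases h0 : PySem.List.pyGetD drops 0 0 < 8 <;>
        by_cases h1 : PySem.List.pyGetD drops (-1) 0 > 12 <;>
          simp [h0, h1] <;> omega
    · by_cases hv1 : pvViol drops ≤ 1
      · have h1 : pvViol drops = 1 := by omega
        simp [h1, hge]
        by_cases h0 : PySem.List.pyGetD drops 0 0 < 8 <;>
          by_cases h2 : PySem.List.pyGetD drops (-1) 0 > 12 <;>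
            simp [h0, h2] <;> omega
      · have h2 : 1 < (pvViol drops : Int) := by exact_mod_cast (by omega : 1 < pvViol drops)
        simp [hv, hv1, h2]

-- ===== VERDICT (by name: the statement is the Claim_ definition above) =====
theorem valid_vcp_spec : Claim_equal_valid_vcp := by
  intro drops _
  unfold Spec_valid_vcp
  exact valid_vcp_eq_alt drops
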